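-- pv_equiv track=rewrite | github.com/jkodner05/Saturation | read_lemmas_CHILDES_by_dir.py | combine_freqs_bytype
-- ===== SOURCE A (Python) =====
-- def combine_freqs_bytype(freqsbymorph, morphsbytype, infl):
--     freqsbytype = {}
--     for word, morphs in morphsbytype.items():
--         freqsbytype[word] = 0
--         for morph in morphs:
--             freqsbytype[word] += freqsbymorph[morph]
--
--     freqsbytypefiltered = {}
--     if infl:
--         for word, morphs in morphsbytype.items():
--             hasinfl = False
--             for morph in morphs:
--                 if infl in morph.lower():
--                     hasinfl = True
--             if hasinfl:
--                 freqsbytypefiltered[word] = freqsbytype[word]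
--     else:
--         freqsbytypefiltered = freqsbytype
--
--     return freqsbytypefiltered
-- ===== SOURCE B (Python) =====
-- def combine_freqs_bytype(freqsbymorph, morphsbytype, infl):
--     # Inverted index: morph -> occurrences of words containing it (with multiplicity).
--     occurrences = {}
--     for word, morphs in morphsbytype.items():
--         for morph in morphs:
--             occurrences.setdefault(morph, []).append(word)
--     # Morph-major pass: each morph's frequency is looked up once and distributed
--     # to the words that contain it; inflected words are collected as a set.
--     totals = dict.fromkeys(morphsbytype, 0)
--     inflected = set()
--     for morph, words in occurrences.items():
--         f = freqsbymorph[morph]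
--         for word in words:
--             totals[word] += f
--         if infl and infl in morph.lower():
--             inflected.update(words)
--     if not infl:
--         return totals
--     return {word: totals[word] for word in totals if word in inflected}
-- ===== Notes on version B (the rewrite author's own statement) =====
-- stated objective: alternative
-- what changed: Replaces A's word-major double scan (sum each word's morph frequencies, then re-scan every word's morphs to test the inflection) with an inverted index morph->word occurrences, a single morph-major pass that looks each morph's frequency up once and distributes it to its words while collecting inflected words in a set, and a final set-membership filter.
import Mathlib
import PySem

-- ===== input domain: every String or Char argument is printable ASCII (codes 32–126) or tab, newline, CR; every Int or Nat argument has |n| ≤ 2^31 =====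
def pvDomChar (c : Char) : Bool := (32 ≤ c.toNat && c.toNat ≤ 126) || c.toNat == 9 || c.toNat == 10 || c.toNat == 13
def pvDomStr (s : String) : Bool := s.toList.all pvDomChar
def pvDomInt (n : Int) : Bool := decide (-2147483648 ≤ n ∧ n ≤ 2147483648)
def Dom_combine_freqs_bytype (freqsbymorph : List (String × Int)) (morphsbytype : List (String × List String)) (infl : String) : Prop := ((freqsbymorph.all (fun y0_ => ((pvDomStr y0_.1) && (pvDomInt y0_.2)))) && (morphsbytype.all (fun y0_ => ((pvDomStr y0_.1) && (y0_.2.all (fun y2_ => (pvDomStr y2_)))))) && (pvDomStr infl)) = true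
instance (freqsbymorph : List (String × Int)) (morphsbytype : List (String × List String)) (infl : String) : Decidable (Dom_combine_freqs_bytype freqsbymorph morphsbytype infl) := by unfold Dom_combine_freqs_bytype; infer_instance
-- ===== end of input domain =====

-- B replaces A's word-major double scan by an inverted index morph->word occurrences, one morph-major
-- distribution pass plus a set of inflected words, then a set-membership filter; same results (alternative).


-- ===== PORT A =====
-- literal transliteration of A: first loop builds freqsbytype (freqsbymorph[morph] is exact
-- only inside Pre_, where every morph is a key; there getD 0 equals the Python lookup),
-- second loop re-scans every word's morphs to filter by `infl in morph.lower()`.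
def combine_freqs_bytype (freqsbymorph : List (String × Int)) (morphsbytype : List (String × List String)) (infl : String) : List (String × Int) :=
  let frd := PySem.Dict.ofList freqsbymorph
  let items := (PySem.Dict.ofList morphsbytype).items
  let freqsbytype := items.foldl
    (fun d p => p.2.foldl
      (fun d' m => d'.insert p.1 (d'.getD p.1 0 + frd.getD m 0))
      (d.insert p.1 0))
    PySem.Dict.empty
  if infl ≠ "" then
    (items.foldl
      (fun d p =>
        if p.2.foldl (fun h m => if PySem.Str.isIn infl (PySem.Str.lower m) then true else h) false
        then d.insert p.1 (freqsbytype.getD p.1 0) else d)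
      PySem.Dict.empty).items
  else freqsbytype.items

-- ===== PORT B =====
-- literal transliteration of B (Source B): build the inverted index `occ` (setdefault-append =
-- Dict.modify with default []), totals = dict.fromkeys(morphsbytype, 0), then ONE morph-major
-- pass carrying the pair state (totals, inflected); `freqsbymorph[morph]` and `totals[word] += f`
-- are exact as getD 0 / modify with default 0 inside Pre_ (every morph a key) and because every
-- word occurring in `occ` is a key of totals; the final comprehension
-- `{word: totals[word] for word in totals if word in inflected}` is totals.items filtered by
-- set membership (totals has unique keys, so items pairs ARE (word, totals[word])).
def combine_freqs_bytype_alt (freqsbymorph : List (String × Int)) (morphsbytype : List (String × List String)) (infl : String) : List (String × Int) :=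
  let mbtd := PySem.Dict.ofList morphsbytype
  let occ := mbtd.items.foldl
    (fun d p => p.2.foldl (fun d' m => d'.modify m [] (· ++ [p.1])) d)
    PySem.Dict.empty
  let frd := PySem.Dict.ofList freqsbymorph
  let totals0 : PySem.Dict String Int := mbtd.keys.foldl (fun d w => d.insert w 0) PySem.Dict.empty
  let st := occ.items.foldl
    (fun (st : PySem.Dict String Int × PySem.Set String) q =>
      let f := frd.getD q.1 0
      ( q.2.foldl (fun t w => t.modify w 0 (· + f)) st.1,
        if infl ≠ "" ∧ PySem.Str.isIn infl (PySem.Str.lower q.1) = true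
        then PySem.Set.update st.2 q.2 else st.2 ))
    (totals0, PySem.Set.empty)
  if infl = "" then st.1.items
  else st.1.items.filter (fun p => PySem.Set.contains st.2 p.1)

-- ===== PRECONDITION & SPEC =====
-- Pre_ excludes exactly the inputs where Python A raises KeyError: some morph of the (dict of)
-- morphsbytype is not a key of freqsbymorph.
def Pre_combine_freqs_bytype (freqsbymorph : List (String × Int)) (morphsbytype : List (String × List String)) (infl : String) : Prop :=
  ∀ p ∈ (PySem.Dict.ofList morphsbytype).items, ∀ m ∈ p.2, m ∈ freqsbymorph.map Prod.fst
instance (freqsbymorph : List (String × Int)) (morphsbytype : List (String × List String)) (infl : String) : Decidable (Pre_combine_freqs_bytype freqsbymorph morphsbytype infl) := by unfold Pre_combine_freqs_bytype; infer_instance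
def pvWitness_combine_freqs_bytype : (List (String × Int)) × (List (String × List String)) × String :=
  ([("s", 2), ("walk", 5)], [("walks", ["walk", "s"]), ("walk", ["walk"])], "s")

def Spec_combine_freqs_bytype (freqsbymorph : List (String × Int)) (morphsbytype : List (String × List String)) (infl : String) (out : List (String × Int)) : Prop := out = combine_freqs_bytype_alt freqsbymorph morphsbytype infl
instance (freqsbymorph : List (String × Int)) (morphsbytype : List (String × List String)) (infl : String) (out : List (String × Int)) : Decidable (Spec_combine_freqs_bytype freqsbymorph morphsbytype infl out) := by unfold Spec_combine_freqs_bytype; infer_instance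

-- ===== CLAIM (what is proved, stated in full; the proofs are below) =====
def Claim_equal_combine_freqs_bytype : Prop := ∀ (freqsbymorph : List (String × Int)) (morphsbytype : List (String × List String)) (infl : String), Dom_combine_freqs_bytype freqsbymorph morphsbytype infl → Pre_combine_freqs_bytype freqsbymorph morphsbytype infl → Spec_combine_freqs_bytype freqsbymorph morphsbytype infl (combine_freqs_bytype freqsbymorph morphsbytype infl)

-- ===== LEMMAS AND PROOFS =====

-- A-side: the inner accumulation loop over one word's morphs is one insert of the sum.
theorem pvInnerSum (ms : List String) (d : PySem.Dict String Int) (w : String) (c : String → Int) (s : Int) :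
    ms.foldl (fun d' m => d'.insert w (d'.getD w 0 + c m)) (d.insert w s)
      = d.insert w (s + (ms.map c).sum) := by
  induction ms generalizing s with
  | nil => simp
  | cons m ms ih =>
      simp only [List.foldl_cons, PySem.Dict.getD_insert_self, PySem.Dict.insert_insert_self,
        List.map_cons, List.sum_cons]
      rw [ih]
      ring_nf

-- A-side: the hasinfl loop is List.any.
theorem pvHasinflAny (ms : List String) (P : String → Bool) (b : Bool) :
    ms.foldl (fun h m => if P m then true else h) b = (b || ms.any P) := by
  induction ms generalizing b with
  | nil => simp
  | cons m ms ih =>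
      simp only [List.foldl_cons, List.any_cons, ih]
      cases P m <;> simp

-- A-side: a conditional-insert loop over fresh distinct keys builds exactly a filterMap.
theorem pvFoldlCondInsert (l : List (String × List String)) (q : (String × List String) → Bool)
    (v : (String × List String) → Int) (d : PySem.Dict String Int)
    (hnd : (l.map Prod.fst).Nodup) (hfresh : ∀ p ∈ l, d.contains p.1 = false) :
    (l.foldl (fun d' p => if q p then d'.insert p.1 (v p) else d') d).items
      = d.items ++ l.filterMap (fun p => if q p then some (p.1, v p) else none) := by
  induction l generalizing d with
  | nil => simp
  | cons p l ih =>
      simp only [List.map_cons, List.nodup_cons] at hnd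
      by_cases hq : q p = true
      · simp only [List.foldl_cons, List.filterMap_cons, if_pos hq]
        rw [ih _ hnd.2 ?_]
        · rw [PySem.Dict.items_insert_of_not_contains _ _ (hfresh p (List.mem_cons_self ..))]
          simp
        · intro p' hp'
          rw [PySem.Dict.contains_insert]
          have h1 : (p'.1 == p.1) = false := by
            simp only [beq_eq_false_iff_ne, ne_eq]
            intro hc
            exact hnd.1 (hc ▸ List.mem_map_of_mem hp')
          simp [h1, hfresh p' (List.mem_cons_of_mem _ hp')]
      · simp only [List.foldl_cons, List.filterMap_cons, if_neg hq]
        exact ih _ hnd.2 (fun p' hp' => hfresh p' (List.mem_cons_of_mem _ hp'))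

-- A-side: A's first loop, over the nodup-keyed items list, appends one summed entry per word.
theorem pvFirstLoopItems (frd : PySem.Dict String Int) (l : List (String × List String))
    (hnd : (l.map Prod.fst).Nodup) :
    (l.foldl (fun d p => p.2.foldl
        (fun d' m => d'.insert p.1 (d'.getD p.1 0 + frd.getD m 0)) (d.insert p.1 0))
        PySem.Dict.empty).items
      = l.map (fun p => (p.1, (p.2.map (fun m => frd.getD m 0)).sum)) := by
  have hstep : (fun (d : PySem.Dict String Int) (p : String × List String) => p.2.foldl
        (fun d' m => d'.insert p.1 (d'.getD p.1 0 + frd.getD m 0)) (d.insert p.1 0))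
      = fun d p => d.insert p.1 ((p.2.map (fun m => frd.getD m 0)).sum) := by
    funext d p
    rw [pvInnerSum]
    ring_nf
  rw [hstep,
    PySem.Dict.items_foldl_insert_fresh l Prod.fst
      (fun p => (p.2.map (fun m => frd.getD m 0)).sum) PySem.Dict.empty
      (fun a _ => by simp) hnd]
  simp [show (PySem.Dict.empty : PySem.Dict String Int).items = [] from rfl]

theorem pvKeysNodupItems (mbt : List (String × List String)) :
    (((PySem.Dict.ofList mbt).items).map Prod.fst).Nodup :=
  PySem.Dict.nodup_keys_ofList mbt

-- B-side: a nested per-item loop flattened to one fold over generated elements.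
theorem pvFoldlFlatten {alpha beta gamma delta : Type} (l : List alpha) (els : alpha → List beta)
    (k : alpha → beta → delta) (g : gamma → delta → gamma) (init : gamma) :
    l.foldl (fun acc p => (els p).foldl (fun a b => g a (k p b)) acc) init
      = (l.flatMap (fun p => (els p).map (k p))).foldl g init := by
  induction l generalizing init with
  | nil => rfl
  | cons p l ih =>
      simp only [List.flatMap_cons, List.foldl_append, List.foldl_map, List.foldl_cons]
      rw [ih]

-- B-side: the pair-state fold splits into its two independent component folds.
theorem pvStepSplit (frd : PySem.Dict String Int) (infl : String)
    (L : List (String × List String)) (t0 : PySem.Dict String Int) (s0 : PySem.Set String) :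
    L.foldl (fun (st : PySem.Dict String Int × PySem.Set String) q =>
        let f := frd.getD q.1 0
        ( q.2.foldl (fun t w => t.modify w 0 (· + f)) st.1,
          if infl ≠ "" ∧ PySem.Str.isIn infl (PySem.Str.lower q.1) = true
          then PySem.Set.update st.2 q.2 else st.2 ))
      (t0, s0)
    = (L.foldl (fun t q => q.2.foldl (fun t w => t.modify w 0 (· + frd.getD q.1 0)) t) t0,
       L.foldl (fun s q => if infl ≠ "" ∧ PySem.Str.isIn infl (PySem.Str.lower q.1) = true
                then PySem.Set.update s q.2 else s) s0) := by
  induction L generalizing t0 s0 with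
  | nil => rfl
  | cons q L ih => simp only [List.foldl_cons]; exact ih _ _

-- B-side: value of the modify-add fold at one key.
theorem pvGetDFoldlModifyAdd (L : List (String × Int)) (d : PySem.Dict String Int) (w : String) :
    (L.foldl (fun t p => t.modify p.1 0 (· + p.2)) d).getD w 0
      = d.getD w 0 + ((L.filter (fun p => p.1 == w)).map (·.2)).sum := by
  induction L generalizing d with
  | nil => simp
  | cons p L ih =>
      simp only [List.foldl_cons, List.filter_cons]
      rw [ih, PySem.Dict.getD_modify]
      by_cases h : p.1 = w
      · rw [if_pos h.symm]
        simp only [h, beq_self_eq_true, if_pos, List.map_cons, List.sum_cons]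
        ring
      · rw [if_neg (fun hw => h hw.symm)]
        simp [h]

-- B-side: every key stays at 0 in dict.fromkeys(·, 0).
theorem pvGetDInsertZero (l : List String) (d : PySem.Dict String Int)
    (h : ∀ w, d.getD w 0 = 0) (w : String) :
    (l.foldl (fun d' w' => d'.insert w' 0) d).getD w 0 = 0 := by
  induction l generalizing d with
  | nil => exact h w
  | cons x l ih =>
      simp only [List.foldl_cons]
      exact ih _ (fun w' => by rw [PySem.Dict.getD_insert]; split <;> simp [h])

-- B-side: updating a set with elements it already has changes nothing.
theorem pvSetUpdateSubset (s : PySem.Set String) (xs : List String)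
    (h : ∀ x ∈ xs, x ∈ s) : PySem.Set.update s xs = s := by
  rw [PySem.Set.update_eq_append_filter]
  have hz : (PySem.Set.ofList xs).filter (fun y => !s.contains y) = [] := by
    rw [List.filter_eq_nil_iff]
    intro y hy
    simp [h y ((PySem.Set.mem_ofList xs y).mp hy)]
  rw [hz, List.append_nil]

-- B-side: membership in the conditional set-update fold.
theorem pvMemFoldlUpdateIf {beta : Type} (l : List beta) (P : beta → Prop) [DecidablePred P]
    (els : beta → List String) (s : PySem.Set String) (w : String) :
    w ∈ l.foldl (fun s' q => if P q then PySem.Set.update s' (els q) else s') s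
      ↔ w ∈ s ∨ ∃ q ∈ l, P q ∧ w ∈ els q := by
  induction l generalizing s with
  | nil => simp
  | cons q l ih =>
      simp only [List.foldl_cons]
      by_cases h : P q
      · rw [if_pos h, ih]
        simp only [PySem.Set.mem_update, List.mem_cons]
        constructor
        · rintro ((hs | hq) | ⟨q', hq', hP, hw⟩)
          · exact Or.inl hs
          · exact Or.inr ⟨q, Or.inl rfl, h, hq⟩
          · exact Or.inr ⟨q', Or.inr hq', hP, hw⟩
        · rintro (hs | ⟨q', (rfl | hq'), hP, hw⟩)
          · exact Or.inl (Or.inl hs)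
          · exact Or.inl (Or.inr hw)
          · exact Or.inr ⟨q', hq', hP, hw⟩
      · rw [if_neg h, ih]
        simp only [List.mem_cons]
        constructor
        · rintro (hs | ⟨q', hq', hP, hw⟩)
          · exact Or.inl hs
          · exact Or.inr ⟨q', Or.inr hq', hP, hw⟩
        · rintro (hs | ⟨q', (rfl | hq'), hP, hw⟩)
          · exact Or.inl hs
          · exact absurd hP h
          · exact Or.inr ⟨q', hq', hP, hw⟩

-- B-side: sum of the filtered snd-projections over a flatMap, groupwise.
theorem pvSumFilterFlatMap {alpha : Type} (l : List alpha) (g : alpha → List (String × Int))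
    (P : String × Int → Bool) :
    (((l.flatMap g).filter P).map (·.2)).sum
      = (l.map (fun q => (((g q).filter P).map (·.2)).sum)).sum := by
  induction l with
  | nil => rfl
  | cons q l ih =>
      simp only [List.flatMap_cons, List.filter_append, List.map_append, List.sum_append,
        List.map_cons, List.sum_cons, ih]

-- B-side: occurrences of (morph m, word p.1) among the pairs count m's multiplicity in p's morphs.
theorem pvCountPairs (l : List (String × List String)) (hnd : (l.map Prod.fst).Nodup)
    (p : String × List String) (hp : p ∈ l) (m : String) :
    (l.flatMap (fun p' => p'.2.map (fun m' => (m', p'.1)))).countP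
        (fun r => r.2 == p.1 && r.1 == m) = p.2.count m := by
  induction l with
  | nil => cases hp
  | cons p' l ih =>
      simp only [List.map_cons, List.nodup_cons] at hnd
      simp only [List.flatMap_cons, List.countP_append, List.countP_map]
      rcases List.mem_cons.mp hp with heq | h
      · subst heq
        have hz : (l.flatMap (fun p'' => p''.2.map (fun m' => (m', p''.1)))).countP
            (fun r => r.2 == p.1 && r.1 == m) = 0 := by
          rw [List.countP_eq_zero]
          intro r hr
          simp only [List.mem_flatMap, List.mem_map] at hr
          obtain ⟨p'', hp'', m', _, rfl⟩ := hr
          have hne : p''.1 ≠ p.1 := fun hc => hnd.1 (hc ▸ List.mem_map_of_mem hp'')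
          simp [hne]
        rw [hz, Nat.add_zero]
        have hcomp : ((fun r : String × String => r.2 == p.1 && r.1 == m) ∘ fun m' => (m', p.1))
            = fun m' => m' == m := by
          funext m'; simp
        rw [hcomp, List.count_eq_length_filter, List.countP_eq_length_filter]
      · have hne : p'.1 ≠ p.1 := by
          intro hc
          exact hnd.1 (hc ▸ List.mem_map_of_mem h)
        have hz : List.countP ((fun r : String × String => r.2 == p.1 && r.1 == m) ∘ fun m' => (m', p'.1)) p'.2 = 0 := by
          rw [List.countP_eq_zero]
          intro a _
          simp [hne]
        rw [hz, Nat.zero_add]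
        exact ih hnd.2 h

-- nodup keys imply fst-injectivity on items.
theorem pvFstInj (l : List (String × List String)) (hnd : (l.map Prod.fst).Nodup)
    {p p' : String × List String} (hp : p ∈ l) (hp' : p' ∈ l) (h : p'.1 = p.1) : p' = p :=
  List.inj_on_of_nodup_map hnd hp' hp h

-- membership in the word-major pairs list.
theorem pvPairsMem (l : List (String × List String)) (m w : String) :
    (m, w) ∈ l.flatMap (fun p' => p'.2.map (fun m' => (m', p'.1)))
      ↔ ∃ p' ∈ l, p'.1 = w ∧ m ∈ p'.2 := by
  simp only [List.mem_flatMap, List.mem_map, Prod.mk.injEq]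
  constructor
  · rintro ⟨p', hp', m', hm', rfl, rfl⟩
    exact ⟨p', hp', rfl, hm'⟩
  · rintro ⟨p', hp', rfl, hm⟩
    exact ⟨p', hp', m, hm, rfl, rfl⟩

-- the if-then-some filterMap is a filter-then-map.
theorem pvFilterMapIte {alpha beta : Type} (l : List alpha) (c : alpha → Bool) (f : alpha → beta) :
    l.filterMap (fun a => if c a then some (f a) else none) = (l.filter c).map f := by
  induction l with
  | nil => rfl
  | cons a l ih => by_cases h : c a <;> simp [h, ih]

-- multiplicity-weighted sum over a nodup superset equals the plain sum.
theorem pvSumCountMul (M : List String) (hM : M.Nodup) (ms : List String) (f : String → Int)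
    (hsub : ∀ m ∈ ms, m ∈ M) :
    (M.map (fun m => (ms.count m : Int) * f m)).sum = (ms.map f).sum := by
  induction M generalizing ms with
  | nil =>
      have hms : ms = [] := by
        cases ms with
        | nil => rfl
        | cons a t => exact absurd (hsub a (List.mem_cons_self ..)) (List.not_mem_nil)
      simp [hms]
  | cons k M ih =>
      simp only [List.map_cons, List.sum_cons]
      have hnd := List.nodup_cons.mp hM
      have hperm := List.filter_append_perm (fun x => x == k) ms
      have hsplit : (ms.map f).sum
          = ((ms.filter (fun x => x == k)).map f).sum + ((ms.filter (fun x => !(x == k))).map f).sum := by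
        rw [← List.sum_append, ← List.map_append]
        exact (List.Perm.sum_eq (List.Perm.map f hperm)).symm
      have hconst : ((ms.filter (fun x => x == k)).map f).sum = (ms.count k : Int) * f k := by
        have hcg : (ms.filter (fun x => x == k)).map f = (ms.filter (fun x => x == k)).map (fun _ => f k) := by
          apply List.map_congr_left
          intro x hx
          have : x = k := by simpa using (List.mem_filter.mp hx).2
          rw [this]
        rw [hcg, PySem.List.sum_map_const_int, List.count_eq_length_filter]
      have hcount : ∀ m ∈ M, ms.count m = (ms.filter (fun x => !(x == k))).count m := by
        intro m hm
        have hne : m ≠ k := fun hc => hnd.1 (hc ▸ hm)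
        rw [List.count_eq_length_filter, List.count_eq_length_filter, List.filter_filter]
        congr 1
        apply List.filter_congr
        intro x _
        by_cases hx : x = m
        · subst hx; simp [hne]
        · simp [hx]
      have hmap : (M.map (fun m => (ms.count m : Int) * f m)).sum
          = (M.map (fun m => ((ms.filter (fun x => !(x == k))).count m : Int) * f m)).sum := by
        congr 1
        apply List.map_congr_left
        intro m hm
        rw [hcount m hm]
      rw [hsplit, hconst, hmap,
        ih hnd.2 (ms.filter (fun x => !(x == k))) (fun m hm => by
          rcases List.mem_filter.mp hm with ⟨hms, hbk⟩
          rcases List.mem_cons.mp (hsub m hms) with hc | hc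
          · exact absurd hc (by simpa using hbk)
          · exact hc)]

-- ===== VERDICT (by name: the statement is the Claim_ definition above) =====
theorem combine_freqs_bytype_spec : Claim_equal_combine_freqs_bytype := by
  intro fr mbt infl _ _
  show combine_freqs_bytype fr mbt infl = combine_freqs_bytype_alt fr mbt infl
  simp only [combine_freqs_bytype, combine_freqs_bytype_alt]
  set frd := PySem.Dict.ofList fr with hfrd
  set items := (PySem.Dict.ofList mbt).items with hitems
  have hnd : (items.map Prod.fst).Nodup := pvKeysNodupItems mbt
  set pairs := items.flatMap (fun p => p.2.map (fun m => (m, p.1))) with hpairs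
  set M := PySem.Set.ofList (pairs.map Prod.fst) with hM
  -- occurrences dict
  set occ := items.foldl (fun d p => p.2.foldl (fun d' m => d'.modify m [] (· ++ [p.1])) d)
      PySem.Dict.empty with hocc
  have hocc2 : occ = pairs.foldl (fun d q => d.modify q.1 [] (· ++ [q.2])) PySem.Dict.empty := by
    rw [hocc, hpairs]
    exact pvFoldlFlatten items Prod.snd (fun p m => (m, p.1))
      (fun d q => d.modify q.1 [] (· ++ [q.2])) PySem.Dict.empty
  have hoccgetD : ∀ m, occ.getD m [] = (pairs.filter (fun q => q.1 == m)).map (·.2) := by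
    intro m
    rw [hocc2, PySem.Dict.getD_foldl_modify_append]
    simp [PySem.Dict.getD_empty]
  have hocckeys : occ.keys = M := by
    rw [hocc2,
      PySem.Dict.keys_foldl_modify_key pairs Prod.fst [] (fun _ q => (· ++ [q.2])) PySem.Dict.empty,
      PySem.Dict.keys_empty, PySem.Set.update_nil_left, hM]
  have hoccnd : occ.keys.Nodup := by rw [hocckeys, hM]; exact PySem.Set.nodup_ofList _
  have hoccitems : occ.items
      = M.map (fun m => (m, (pairs.filter (fun q => q.1 == m)).map (·.2))) := by
    rw [PySem.Dict.items_eq_map_keys occ hoccnd [], hocckeys]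
    exact List.map_congr_left (fun m _ => by rw [hoccgetD])
  -- totals0 = dict.fromkeys(morphsbytype, 0)
  set totals0 : PySem.Dict String Int :=
    ((PySem.Dict.ofList mbt).keys).foldl (fun d w => d.insert w 0) PySem.Dict.empty with htot0
  have hkeysl : (PySem.Dict.ofList mbt).keys = items.map Prod.fst := by
    rw [hitems]; rfl
  have htot0getD : ∀ w, totals0.getD w 0 = 0 := by
    intro w
    exact pvGetDInsertZero _ _ (fun w' => PySem.Dict.getD_empty w' 0) w
  have htot0keys : totals0.keys = items.map Prod.fst := by
    rw [htot0,
      PySem.Dict.keys_foldl_insert ((PySem.Dict.ofList mbt).keys) (fun _ _ => 0) PySem.Dict.empty,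
      PySem.Dict.keys_empty, PySem.Set.update_nil_left, hkeysl,
      PySem.Set.ofList_eq_self_of_nodup _ hnd]
  have htot0nd : totals0.keys.Nodup := by rw [htot0keys]; exact hnd
  -- split the morph-major pass
  rw [pvStepSplit]
  dsimp only
  set T := occ.items.foldl (fun t q => q.2.foldl (fun t w => t.modify w 0 (· + frd.getD q.1 0)) t)
      totals0 with hT
  set I := occ.items.foldl (fun s q =>
      if infl ≠ "" ∧ PySem.Str.isIn infl (PySem.Str.lower q.1) = true
      then PySem.Set.update s q.2 else s) PySem.Set.empty with hI
  -- flatten the totals component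
  set L := occ.items.flatMap (fun q => q.2.map (fun w => (w, frd.getD q.1 0))) with hL
  have hT2 : T = L.foldl (fun t r => t.modify r.1 0 (· + r.2)) totals0 := by
    rw [hT, hL]
    exact pvFoldlFlatten occ.items Prod.snd (fun q w => (w, frd.getD q.1 0))
      (fun t r => t.modify r.1 0 (· + r.2)) totals0
  -- pairs membership facts
  have hpairsmem : ∀ m w, (m, w) ∈ pairs ↔ ∃ p' ∈ items, p'.1 = w ∧ m ∈ p'.2 := by
    intro m w; rw [hpairs]; exact pvPairsMem items m w
  have hWmem : ∀ m w, w ∈ (pairs.filter (fun q => q.1 == m)).map (·.2) ↔ (m, w) ∈ pairs := by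
    intro m w
    simp only [List.mem_map, List.mem_filter]
    constructor
    · rintro ⟨⟨r1, r2⟩, ⟨hr, hbeq⟩, rfl⟩
      have h1 : r1 = m := by simpa using hbeq
      subst h1
      exact hr
    · intro h
      exact ⟨(m, w), ⟨h, by simp⟩, rfl⟩
  -- every word appearing in L is a key of totals0
  have hLsub : ∀ w ∈ L.map Prod.fst, w ∈ totals0.keys := by
    intro w hw
    rw [htot0keys]
    simp only [hL, List.map_flatMap, List.mem_flatMap, List.map_map, List.mem_map] at hw
    obtain ⟨q, hq, x, hx, rfl⟩ := hw
    rw [hoccitems] at hq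
    obtain ⟨m, _, rfl⟩ := List.mem_map.mp hq
    have hp : ((m, x) : String × String) ∈ pairs := (hWmem m x).mp (by simpa using hx)
    obtain ⟨p', hp', rfl, _⟩ := (hpairsmem m x).mp hp
    exact List.mem_map_of_mem hp'
  have hTkeys : T.keys = items.map Prod.fst := by
    rw [hT2,
      PySem.Dict.keys_foldl_modify_key L Prod.fst 0 (fun _ r => (· + r.2)) totals0,
      pvSetUpdateSubset _ _ (fun x hx => hLsub x hx), htot0keys]
  have hTnd : T.keys.Nodup := by rw [hTkeys]; exact hnd
  -- the per-word total is the word-major sum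
  have hsum : ∀ p ∈ items, T.getD p.1 0 = (p.2.map (fun m => frd.getD m 0)).sum := by
    intro p hp
    rw [hT2, pvGetDFoldlModifyAdd, htot0getD, zero_add, hL,
      pvSumFilterFlatMap occ.items (fun q => q.2.map (fun w => (w, frd.getD q.1 0)))
        (fun r => r.1 == p.1), hoccitems]
    have hinner : ∀ m : String,
        ((((pairs.filter (fun q => q.1 == m)).map (·.2)).map
            (fun w => (w, frd.getD m 0))).filter (fun r => r.1 == p.1)).map (·.2)
          = (((pairs.filter (fun q => q.1 == m)).map (·.2)).filter (fun w => w == p.1)).map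
              (fun _ => frd.getD m 0) := by
      intro m
      rw [List.filter_map, List.map_map]
      rfl
    have hcnt : ∀ m : String,
        (((pairs.filter (fun q => q.1 == m)).map (·.2)).filter (fun w => w == p.1)).length
          = p.2.count m := by
      intro m
      rw [List.filter_map, List.length_map, ← List.countP_eq_length_filter, List.countP_filter]
      have : (fun a : String × String => ((fun w => w == p.1) ∘ (·.2)) a && (a.1 == m))
          = fun r => r.2 == p.1 && r.1 == m := rfl
      rw [this, hpairs]
      exact pvCountPairs items hnd p hp m
    have hrw : (M.map (fun m => (m, (pairs.filter (fun q => q.1 == m)).map (·.2)))).map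
        (fun q => (((q.2.map (fun w => (w, frd.getD q.1 0))).filter (fun r => r.1 == p.1)).map (·.2)).sum)
        = M.map (fun m => (p.2.count m : Int) * frd.getD m 0) := by
      rw [List.map_map]
      apply List.map_congr_left
      intro m _
      show (((((pairs.filter (fun q => q.1 == m)).map (·.2)).map
          (fun w => (w, frd.getD m 0))).filter (fun r => r.1 == p.1)).map (·.2)).sum
        = (p.2.count m : Int) * frd.getD m 0
      rw [hinner m, PySem.List.sum_map_const_int, hcnt m]
    rw [hrw]
    apply pvSumCountMul M (by rw [hM]; exact PySem.Set.nodup_ofList _) p.2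
      (fun m => frd.getD m 0)
    intro m hm
    rw [hM, PySem.Set.mem_ofList]
    have : (m, p.1) ∈ pairs := (hpairsmem m p.1).mpr ⟨p, hp, rfl, hm⟩
    exact List.mem_map.mpr ⟨(m, p.1), this, rfl⟩
  -- T.items pointwise
  have hTitems : T.items = items.map (fun p => (p.1, (p.2.map (fun m => frd.getD m 0)).sum)) := by
    rw [PySem.Dict.items_eq_map_keys T hTnd 0, hTkeys, List.map_map]
    apply List.map_congr_left
    intro p hp
    show (p.1, T.getD p.1 0) = (p.1, (p.2.map (fun m => frd.getD m 0)).sum)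
    rw [hsum p hp]
  by_cases hinfl : infl = ""
  · rw [if_neg (by simp [hinfl]), if_pos hinfl]
    rw [pvFirstLoopItems frd items hnd, hTitems]
  · rw [if_pos (by simp [hinfl]), if_neg hinfl]
    -- A side
    rw [pvFoldlCondInsert items _ _ _ hnd (fun p _ => by simp)]
    have hemp : (PySem.Dict.empty : PySem.Dict String Int).items = [] := rfl
    rw [hemp, List.nil_append]
    have hA : items.filterMap (fun p =>
        if p.2.foldl (fun h m => if PySem.Str.isIn infl (PySem.Str.lower m) then true else h) false
        then some (p.1, (items.foldl (fun d p' => p'.2.foldl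
            (fun d' m => d'.insert p'.1 (d'.getD p'.1 0 + frd.getD m 0)) (d.insert p'.1 0))
            PySem.Dict.empty).getD p.1 0)
        else none)
        = items.filterMap (fun p =>
          if p.2.any (fun m => PySem.Str.isIn infl (PySem.Str.lower m))
          then some (p.1, (p.2.map (fun m => frd.getD m 0)).sum) else none) := by
      apply List.filterMap_congr
      intro p hp
      rw [pvHasinflAny]
      have hg : (items.foldl (fun d p' => p'.2.foldl
            (fun d' m => d'.insert p'.1 (d'.getD p'.1 0 + frd.getD m 0)) (d.insert p'.1 0))
            PySem.Dict.empty).getD p.1 0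
          = (p.2.map (fun m => frd.getD m 0)).sum := by
        apply PySem.Dict.getD_of_mem_items
        · rw [pvFirstLoopItems frd items hnd]
          exact List.mem_map_of_mem hp
        · show ((items.foldl (fun d p' => p'.2.foldl
              (fun d' m => d'.insert p'.1 (d'.getD p'.1 0 + frd.getD m 0)) (d.insert p'.1 0))
              PySem.Dict.empty).items.map Prod.fst).Nodup
          rw [pvFirstLoopItems frd items hnd]
          simpa using hnd
      rw [hg]
      simp
    rw [hA, pvFilterMapIte items (fun p => p.2.any (fun m => PySem.Str.isIn infl (PySem.Str.lower m)))
      (fun p => (p.1, (p.2.map (fun m => frd.getD m 0)).sum))]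
    -- B side
    rw [hTitems, List.filter_map]
    congr 1
    apply List.filter_congr
    intro p hp
    -- contains I p.1 = any inflP p.2
    have hImem : ∀ w, w ∈ I ↔ ∃ q ∈ occ.items,
        (infl ≠ "" ∧ PySem.Str.isIn infl (PySem.Str.lower q.1) = true) ∧ w ∈ q.2 := by
      intro w
      rw [hI]
      rw [pvMemFoldlUpdateIf occ.items
        (fun q => infl ≠ "" ∧ PySem.Str.isIn infl (PySem.Str.lower q.1) = true) Prod.snd
        PySem.Set.empty w]
      simp [PySem.Set.empty]
    show (p.2.any fun m => PySem.Str.isIn infl (PySem.Str.lower m))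
        = PySem.Set.contains I ((fun p => (p.1, (p.2.map (fun m => frd.getD m 0)).sum)) p).1
    symm
    rw [Bool.eq_iff_iff, PySem.Set.contains_iff, hImem, List.any_eq_true]
    constructor
    · rintro ⟨q, hq, ⟨_, hinflm⟩, hw⟩
      rw [hoccitems] at hq
      obtain ⟨m, _, rfl⟩ := List.mem_map.mp hq
      have hpr : ((m, p.1) : String × String) ∈ pairs := (hWmem m p.1).mp hw
      obtain ⟨p', hp', hfst, hm⟩ := (hpairsmem m p.1).mp hpr
      have : p' = p := pvFstInj items hnd hp hp' hfst
      subst this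
      exact ⟨m, hm, hinflm⟩
    · rintro ⟨m, hm, hinflm⟩
      have hpr : ((m, p.1) : String × String) ∈ pairs := (hpairsmem m p.1).mpr ⟨p, hp, rfl, hm⟩
      have hmM : m ∈ M := by
        rw [hM, PySem.Set.mem_ofList]
        exact List.mem_map.mpr ⟨(m, p.1), hpr, rfl⟩
      refine ⟨(m, (pairs.filter (fun q => q.1 == m)).map (·.2)), ?_, ⟨hinfl, hinflm⟩, ?_⟩
      · rw [hoccitems]
        exact List.mem_map.mpr ⟨m, hmM, rfl⟩
      · exact (hWmem m p.1).mpr hpr
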